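-- pv_equiv track=rewrite | github.com/dungarpan/Quine-Mccluskey | q-m_program.py | binary_to_letter
-- ===== SOURCE A (Python) =====
-- def binary_to_letter(s):
--     out = ''
--     c = 'a'
--     more = False
--     n = 0
--     for i in range(len(s)):
--         #if it is a range a-zA-Z
--         if more == False:
--             if s[i] == '1':
--                 out = out + c
--             elif s[i] == '0':
--                 out = out + c+'\''
--
--         if more == True:
--             if s[i] == '1':
--                 out = out + c + str(n)
--             elif s[i] == '0':
--                 out = out + c + str(n) + '\''
--             n+=1
--         #conditions for next operations
--         if c=='z' and more == False:
--             c = 'A'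
--         elif c=='Z':
--             c = 'a'
--             more = True
--
--         elif more == False:
--             c = chr(ord(c)+1)
--     return out
-- ===== SOURCE B (Python) =====
-- def binary_to_letter(s):
--     parts = []
--     for i, ch in enumerate(s):
--         if i < 26:
--             name = chr(97 + i)
--         elif i < 52:
--             name = chr(65 + i - 26)
--         else:
--             name = 'a' + str(i - 52)
--         if ch == '1':
--             parts.append(name)
--         elif ch == '0':
--             parts.append(name + "'")
--     return ''.join(parts)
-- ===== Notes on version B (the rewrite author's own statement) =====
-- stated objective: simpler
-- what changed: Replaces A's incremental letter/flag/counter state machine with a variable name computed in closed form from the index (lowercase below 26, uppercase below 52, numbered thereafter), collecting pieces in a list joined once.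
import Mathlib
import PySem

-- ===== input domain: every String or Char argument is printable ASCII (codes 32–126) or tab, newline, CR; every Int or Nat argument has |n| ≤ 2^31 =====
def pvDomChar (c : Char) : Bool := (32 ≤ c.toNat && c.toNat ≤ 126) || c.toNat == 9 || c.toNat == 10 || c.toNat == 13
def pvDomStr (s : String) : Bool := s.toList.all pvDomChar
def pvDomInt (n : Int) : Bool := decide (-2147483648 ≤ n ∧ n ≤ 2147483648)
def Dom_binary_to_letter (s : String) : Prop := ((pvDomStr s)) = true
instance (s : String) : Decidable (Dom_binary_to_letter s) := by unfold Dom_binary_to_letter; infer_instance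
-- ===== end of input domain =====

-- B replaces A's incremental (c, more, n) letter/flag/counter state machine by a variable
-- name computed in closed form from the index (objective: simpler).


-- ===== PORT A =====
-- state: (out, c, more, n); strings handled as List Char (Lean's String.append is kernel-opaque)
def pvStepA (st : List Char × Char × Bool × Int) (ch : Char) : List Char × Char × Bool × Int :=
  let out := st.1
  let c := st.2.1
  let more := st.2.2.1
  let n := st.2.2.2
  -- if it is a range a-zA-Z
  let out := if more = false then
      (if ch = '1' then out ++ [c] else if ch = '0' then out ++ [c, '\''] else out)
    else out
  let outn : List Char × Int := if more = true then
      ((if ch = '1' then out ++ c :: PySem.Int.toChars n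
        else if ch = '0' then out ++ c :: PySem.Int.toChars n ++ ['\'']
        else out), n + 1)
    else (out, n)
  -- conditions for next operations
  let cm : Char × Bool :=
    if c = 'z' ∧ more = false then ('A', more)
    else if c = 'Z' then ('a', true)
    else if more = false then (Char.ofNat (c.toNat + 1), more)
    else (c, more)
  (outn.1, cm.1, cm.2, outn.2)

def binary_to_letter (s : String) : String :=
  String.ofList (s.toList.foldl pvStepA ([], 'a', false, 0)).1

-- ===== PORT B =====
-- closed-form variable name for index i
def pvNameB (i : Nat) : List Char :=
  if i < 26 then [Char.ofNat (97 + i)]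
  else if i < 52 then [Char.ofNat (65 + i - 26)]
  else 'a' :: PySem.Int.toChars ((i : Int) - 52)

-- the enumerate loop of Source B, collecting the pieces in order
def pvGoB (i : Nat) : List Char → List Char
  | [] => []
  | ch :: t =>
      (if ch = '1' then pvNameB i
       else if ch = '0' then pvNameB i ++ ['\'']
       else []) ++ pvGoB (i + 1) t

def binary_to_letter_alt (s : String) : String :=
  String.ofList (pvGoB 0 s.toList)

-- ===== PRECONDITION & SPEC =====
def Spec_binary_to_letter (s : String) (out : String) : Prop := out = binary_to_letter_alt s
instance (s : String) (out : String) : Decidable (Spec_binary_to_letter s out) := by unfold Spec_binary_to_letter; infer_instance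

-- ===== CLAIM (what is proved, stated in full; the proofs are below) =====
def Claim_equal_binary_to_letter : Prop := ∀ (s : String), Dom_binary_to_letter s → Spec_binary_to_letter s (binary_to_letter s)

-- ===== LEMMAS AND PROOFS =====

theorem pvChar_toNat_ofNat (m : Nat) (h : m < 127) : (Char.ofNat m).toNat = m := by
  unfold Char.ofNat
  rw [dif_pos (by omega : m.isValidChar)]
  rfl

theorem pvChar_ne_of_toNat_ne {a b : Char} (h : a.toNat ≠ b.toNat) : a ≠ b := by
  intro he; exact h (by rw [he])

-- invariant tying A's loop state to the loop index
def pvInv (i : Nat) (c : Char) (more : Bool) (n : Int) : Prop :=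
  (i < 26 ∧ c = Char.ofNat (97 + i) ∧ more = false ∧ n = 0) ∨
  (26 ≤ i ∧ i < 52 ∧ c = Char.ofNat (65 + i - 26) ∧ more = false ∧ n = 0) ∨
  (52 ≤ i ∧ c = 'a' ∧ more = true ∧ n = (i : Int) - 52)

theorem pvMain (l : List Char) : ∀ (i : Nat) (out : List Char) (c : Char) (more : Bool) (n : Int),
    pvInv i c more n →
    (l.foldl pvStepA (out, c, more, n)).1 = out ++ pvGoB i l := by
  induction l with
  | nil => intro i out c more n _; simp [pvGoB]
  | cons ch t ih =>
    intro i out c more n hinv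
    rcases hinv with ⟨hi, hc, hm, hn⟩ | ⟨hi1, hi2, hc, hm, hn⟩ | ⟨hi, hc, hm, hn⟩
    · -- lowercase region
      subst hc hm hn
      by_cases h25 : i = 25
      · subst h25
        simp only [List.foldl, pvStepA]
        norm_num [(by decide : Char.ofNat (97 + 25) = 'z')]
        rw [ih 26 _ _ _ _ (Or.inr (Or.inl (by norm_num)))]
        simp only [pvGoB, pvNameB]
        norm_num
        split_ifs <;> simp
      · have hz : Char.ofNat (97 + i) ≠ 'z' :=
          pvChar_ne_of_toNat_ne (by rw [pvChar_toNat_ofNat _ (by omega)]; simp [Char.toNat]; omega)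
        have hZ : Char.ofNat (97 + i) ≠ 'Z' :=
          pvChar_ne_of_toNat_ne (by rw [pvChar_toNat_ofNat _ (by omega)]; simp [Char.toNat]; omega)
        simp only [List.foldl, pvStepA]
        norm_num [hz, hZ]
        rw [pvChar_toNat_ofNat _ (by omega), (by omega : 97 + i + 1 = 97 + (i + 1)),
          ih (i + 1) _ _ _ _ (Or.inl ⟨by omega, rfl, rfl, rfl⟩)]
        simp only [pvGoB, pvNameB, if_pos hi]
        split_ifs <;> simp
    · -- uppercase region
      subst hc hm hn
      by_cases h51 : i = 51
      · subst h51
        simp only [List.foldl, pvStepA]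
        norm_num [(by decide : Char.ofNat (65 + 51 - 26) ≠ 'z'),
          (by decide : Char.ofNat (65 + 51 - 26) = 'Z')]
        rw [ih 52 _ _ _ _ (Or.inr (Or.inr (by norm_num)))]
        simp only [pvGoB, pvNameB]
        norm_num
        split_ifs <;> simp
      · have hz : Char.ofNat (65 + i - 26) ≠ 'z' :=
          pvChar_ne_of_toNat_ne (by rw [pvChar_toNat_ofNat _ (by omega)]; simp [Char.toNat]; omega)
        have hZ : Char.ofNat (65 + i - 26) ≠ 'Z' :=
          pvChar_ne_of_toNat_ne (by rw [pvChar_toNat_ofNat _ (by omega)]; simp [Char.toNat]; omega)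
        simp only [List.foldl, pvStepA]
        norm_num [hz, hZ]
        rw [pvChar_toNat_ofNat _ (by omega), (by omega : 65 + i - 26 + 1 = 65 + (i + 1) - 26),
          ih (i + 1) _ _ _ _ (Or.inr (Or.inl ⟨by omega, by omega, rfl, rfl, rfl⟩))]
        simp only [pvGoB, pvNameB, if_neg (by omega : ¬ i < 26), if_pos hi2]
        split_ifs <;> simp
    · -- numbered region: more = true, c = 'a', n = i - 52
      subst hc hm hn
      simp only [List.foldl, pvStepA]
      norm_num
      rw [ih (i + 1) _ _ _ _ (Or.inr (Or.inr ⟨by omega, rfl, rfl, by push_cast; ring⟩))]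
      simp only [pvGoB, pvNameB, if_neg (by omega : ¬ i < 26), if_neg (by omega : ¬ i < 52)]
      split_ifs <;> simp

-- ===== VERDICT (by name: the statement is the Claim_ definition above) =====
theorem binary_to_letter_spec : Claim_equal_binary_to_letter := by
  intro s _
  unfold Spec_binary_to_letter binary_to_letter binary_to_letter_alt
  rw [pvMain s.toList 0 [] 'a' false 0 (Or.inl (by norm_num))]
  rfl
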